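-- pv_equiv track=rewrite | github.com/zxgsy520/lamplic | scripts/core_pan_species.py | stat_include_species
-- ===== SOURCE A (Python) =====
-- def all_true(list1, list2):
--
--     jc = True
--     for i in list1:
--         if i not in list2:
--             jc = False
--             break
--     return jc
--
-- def only_true(list1, list2):
--
--     jc = False
--     for i in list1:
--         if i in list2:
--             jc = True
--             break
--     return jc
--
-- def stat_include_species(data, samples):
--
--     core = 0
--     pan = 0
--
--     for line in data.values():
--         line = list(line)
--         if all_true(samples, line):
--             core += 1
--             pan += 1
--             continue
--         if only_true(samples, line):
--             pan += 1
--
--     return core, pan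
-- ===== SOURCE B (Python) =====
-- def stat_include_species(data, samples):
--
--     counts = {}
--     for s in samples:
--         counts[s] = counts.get(s, 0) + 1
--     n = len(samples)
--
--     core = 0
--     pan = 0
--     for line in data.values():
--         count = 0
--         for x in set(line):
--             count += counts.get(x, 0)
--         if count == n:
--             core += 1
--             pan += 1
--         elif count > 0:
--             pan += 1
--
--     return core, pan
-- ===== Notes on version B (the rewrite author's own statement) =====
-- stated objective: faster
-- what changed: Builds a multiplicity dict of samples once, then classifies each line by summing those multiplicities over the line's distinct members and comparing the count with len(samples), replacing A's two short-circuiting per-line scans of samples against the line list (all_true then only_true).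
import Mathlib
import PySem

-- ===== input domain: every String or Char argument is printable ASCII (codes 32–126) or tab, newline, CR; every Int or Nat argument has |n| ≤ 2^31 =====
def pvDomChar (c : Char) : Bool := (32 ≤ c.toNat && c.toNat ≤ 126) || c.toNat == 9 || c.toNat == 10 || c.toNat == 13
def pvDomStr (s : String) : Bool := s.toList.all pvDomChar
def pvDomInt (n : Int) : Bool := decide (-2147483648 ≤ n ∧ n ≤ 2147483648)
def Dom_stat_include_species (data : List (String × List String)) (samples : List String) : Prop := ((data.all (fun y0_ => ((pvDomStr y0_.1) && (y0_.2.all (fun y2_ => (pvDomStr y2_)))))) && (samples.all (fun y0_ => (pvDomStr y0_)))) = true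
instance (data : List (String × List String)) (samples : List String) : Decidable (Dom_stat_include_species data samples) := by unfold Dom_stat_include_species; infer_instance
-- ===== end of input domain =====

-- B builds a multiplicity dict of samples once and classifies each line by summing those multiplicities over the line's distinct members, replacing A's two short-circuiting per-line scans of samples; objective: faster (measured).

-- ===== PORT A =====
-- all_true(list1, list2): jc=True; for i in list1: if i not in list2: jc=False; break
def pvAllTrue (list1 list2 : List String) : Bool :=
  match list1 with
  | [] => true
  | i :: rest => if list2.contains i then pvAllTrue rest list2 else false

-- only_true(list1, list2): jc=False; for i in list1: if i in list2: jc=True; break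
def pvOnlyTrue (list1 list2 : List String) : Bool :=
  match list1 with
  | [] => false
  | i :: rest => if list2.contains i then true else pvOnlyTrue rest list2

def stat_include_species (data : List (String × List String)) (samples : List String) : Int × Int :=
  data.foldl (fun (st : Int × Int) kv =>
    let line := kv.2          -- line = list(line) (a copy)
    if pvAllTrue samples line then (st.1 + 1, st.2 + 1)
    else if pvOnlyTrue samples line then (st.1, st.2 + 1)
    else st) (0, 0)

-- ===== PORT B =====
def stat_include_species_alt (data : List (String × List String)) (samples : List String) : Int × Int :=
  let counts : PySem.Dict String Int :=
    samples.foldl (fun d s => d.insert s (d.getD s 0 + 1)) PySem.Dict.empty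
  let n : Int := (samples.length : Int)
  data.foldl (fun (st : Int × Int) kv =>
    -- count = 0; for x in set(line): count += counts.get(x, 0)  (sum is iteration-order independent)
    let count : Int := (PySem.Set.ofList kv.2).foldl (fun c x => c + counts.getD x 0) 0
    if count = n then (st.1 + 1, st.2 + 1)
    else if count > 0 then (st.1, st.2 + 1)
    else st) (0, 0)

-- ===== PRECONDITION & SPEC =====
def Spec_stat_include_species (data : List (String × List String)) (samples : List String) (out : Int × Int) : Prop := out = stat_include_species_alt data samples
instance (data : List (String × List String)) (samples : List String) (out : Int × Int) : Decidable (Spec_stat_include_species data samples out) := by unfold Spec_stat_include_species; infer_instance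

-- ===== CLAIM (what is proved, stated in full; the proofs are below) =====
def Claim_equal_stat_include_species : Prop := ∀ (data : List (String × List String)) (samples : List String), Dom_stat_include_species data samples → Spec_stat_include_species data samples (stat_include_species data samples)

-- ===== LEMMAS AND PROOFS =====
lemma pvAllTrue_iff (l1 l2 : List String) :
    pvAllTrue l1 l2 = true ↔ l1.countP (fun s => l2.contains s) = l1.length := by
  induction l1 with
  | nil => simp [pvAllTrue]
  | cons i rest ih =>
    have hle := List.countP_le_length (p := fun s => l2.contains s) (l := rest)
    cases hb : l2.contains i with
    | true =>
      simp only [pvAllTrue, hb, if_true, List.countP_cons, List.length_cons, ih]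
      omega
    | false =>
      simp only [pvAllTrue, hb, List.countP_cons, List.length_cons, reduceIte,
        Bool.false_eq_true, false_iff]
      omega

lemma pvOnlyTrue_iff (l1 l2 : List String) :
    pvOnlyTrue l1 l2 = true ↔ 0 < l1.countP (fun s => l2.contains s) := by
  induction l1 with
  | nil => simp [pvOnlyTrue]
  | cons i rest ih =>
    cases hb : l2.contains i with
    | true =>
      simp only [pvOnlyTrue, hb, List.countP_cons, reduceIte, true_iff]
      omega
    | false =>
      simp only [pvOnlyTrue, hb, List.countP_cons, Bool.false_eq_true, if_false, ih]
      omega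

lemma sum_indicator_zero (s : String) (S : List String) (h : s ∉ S) :
    (S.map (fun x => if s == x then (1 : Int) else 0)).sum = 0 := by
  induction S with
  | nil => simp
  | cons y S' ih =>
    have h1 : (s == y) = false := by simpa using fun e => h (by simp [e])
    simp only [List.map_cons, List.sum_cons, h1, Bool.false_eq_true, if_false, zero_add]
    exact ih (fun hm => h (List.mem_cons_of_mem _ hm))

lemma sum_indicator (s : String) (S : List String) (h : S.Nodup) :
    (S.map (fun x => if s == x then (1 : Int) else 0)).sum
      = if s ∈ S then (1 : Int) else 0 := by
  induction S with
  | nil => simp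
  | cons y S' ih =>
    obtain ⟨hy, hS'⟩ := List.nodup_cons.mp h
    simp only [List.map_cons, List.sum_cons]
    by_cases hb : s = y
    · subst hb
      rw [sum_indicator_zero s S' hy]
      simp
    · have h1 : (s == y) = false := by simpa using hb
      rw [h1, ih hS']
      simp [List.mem_cons, hb]

lemma sum_counts (samples : List String) (S : List String) (h : S.Nodup) :
    (S.map (fun x => (samples.count x : Int))).sum
      = (samples.countP (fun s => S.contains s) : Int) := by
  induction samples with
  | nil => simp
  | cons s rest ih =>
    have hcc : (S.map (fun x => ((s :: rest).count x : Int))).sum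
        = (S.map (fun x => (rest.count x : Int))).sum
          + (S.map (fun x => if s == x then (1 : Int) else 0)).sum := by
      rw [← PySem.List.sum_map_add_int]
      congr 1
      refine List.map_congr_left (fun x _ => ?_)
      rw [List.count_cons]
      push_cast
      rfl
    rw [hcc, ih, sum_indicator s S h, List.countP_cons]
    by_cases hs : s ∈ S
    · simp [List.contains_eq_mem, hs]
    · simp [List.contains_eq_mem, hs]

lemma count_line_eq (samples : List String) (line : List String) :
    (PySem.Set.ofList line).foldl
      (fun c x => c + (samples.foldl (fun d s => d.insert s (d.getD s 0 + 1))
        PySem.Dict.empty).getD x 0) (0 : Int)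
      = (samples.countP (fun s => line.contains s) : Int) := by
  rw [PySem.List.foldl_add, zero_add]
  have hmap : (PySem.Set.ofList line).map
      (fun x => (samples.foldl (fun d s => d.insert s (d.getD s 0 + 1))
        PySem.Dict.empty).getD x 0)
      = (PySem.Set.ofList line).map (fun x => (samples.count x : Int)) := by
    refine List.map_congr_left (fun x _ => ?_)
    rw [PySem.Dict.getD_foldl_insert_add_one]
    rw [show (PySem.Dict.empty : PySem.Dict String Int).getD x 0 = 0 from rfl, zero_add]
  rw [hmap, sum_counts samples _ (PySem.Set.nodup_ofList line)]
  congr 1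
  refine List.countP_congr (fun s _ => ?_)
  simp only [List.contains_eq_mem]
  simp [PySem.Set.mem_ofList]

lemma step_eq (samples : List String) (st : Int × Int) (kv : String × List String) :
    (let line := kv.2
     if pvAllTrue samples line then (st.1 + 1, st.2 + 1)
     else if pvOnlyTrue samples line then (st.1, st.2 + 1)
     else st)
    = (let count : Int := (PySem.Set.ofList kv.2).foldl
         (fun c x => c + (samples.foldl (fun d s => d.insert s (d.getD s 0 + 1))
           PySem.Dict.empty).getD x 0) 0
       if count = (samples.length : Int) then (st.1 + 1, st.2 + 1)
       else if count > 0 then (st.1, st.2 + 1)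
       else st) := by
  simp only [count_line_eq]
  by_cases hall : pvAllTrue samples kv.2 = true
  · have h1 := (pvAllTrue_iff samples kv.2).mp hall
    rw [if_pos hall, if_pos (by exact_mod_cast h1)]
  · have hne : samples.countP (fun s => kv.2.contains s) ≠ samples.length :=
      fun h => hall ((pvAllTrue_iff samples kv.2).mpr h)
    rw [if_neg hall]
    by_cases hany : pvOnlyTrue samples kv.2 = true
    · have hpos := (pvOnlyTrue_iff samples kv.2).mp hany
      rw [if_pos hany, if_neg (by exact_mod_cast hne), if_pos (by exact_mod_cast hpos)]
    · have hz : samples.countP (fun s => kv.2.contains s) = 0 := by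
        by_contra h
        exact hany ((pvOnlyTrue_iff samples kv.2).mpr (Nat.pos_of_ne_zero h))
      rw [if_neg hany, if_neg (by exact_mod_cast hne), if_neg (by
        simp only [hz, Nat.cast_zero]
        omega)]

lemma fold_eq (samples : List String) (data : List (String × List String)) (st : Int × Int) :
    data.foldl (fun (st : Int × Int) kv =>
      let line := kv.2
      if pvAllTrue samples line then (st.1 + 1, st.2 + 1)
      else if pvOnlyTrue samples line then (st.1, st.2 + 1)
      else st) st
    = data.foldl (fun (st : Int × Int) kv =>
      let count : Int := (PySem.Set.ofList kv.2).foldl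
        (fun c x => c + (samples.foldl (fun d s => d.insert s (d.getD s 0 + 1))
          PySem.Dict.empty).getD x 0) 0
      if count = (samples.length : Int) then (st.1 + 1, st.2 + 1)
      else if count > 0 then (st.1, st.2 + 1)
      else st) st := by
  induction data generalizing st with
  | nil => rfl
  | cons kv rest ih =>
    rw [List.foldl_cons, List.foldl_cons, step_eq]
    exact ih _

-- ===== VERDICT (by name: the statement is the Claim_ definition above) =====
theorem stat_include_species_spec : Claim_equal_stat_include_species := by
  intro data samples _
  unfold Spec_stat_include_species stat_include_species stat_include_species_alt
  exact fold_eq samples data (0, 0)
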